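-- pv_equiv track=rewrite | github.com/Raudbjorn/MDMAI | src/source_management/flavor_integrator.py | _blend_tones
-- ===== SOURCE A (Python) =====
-- from typing import Dict, List, Any, Optional, Tuple
-- from collections import defaultdict
--
-- def _blend_tones(tones: List[str]) -> str:
--     """Blend multiple tones together."""
--     if not tones:
--         return 'neutral'
--
--     # Similar to style blending
--     tone_counts = defaultdict(int)
--     for tone in tones:
--         tone_counts[tone] += 1
--
--     max_count = max(tone_counts.values())
--     if max_count > len(tones) / 2:
--         return max(tone_counts, key=tone_counts.get)
--
--     top_tones = sorted(tone_counts.keys(), key=tone_counts.get, reverse=True)[:2]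
--     return f"{top_tones[0]} with hints of {top_tones[1]}"
-- ===== SOURCE B (Python) =====
-- def _blend_tones(tones):
--     """Blend multiple tones together (dominant tone, or top two by linear scans)."""
--     if not tones:
--         return 'neutral'
--
--     counts = {}
--     for tone in tones:
--         counts[tone] = counts.get(tone, 0) + 1
--
--     # first maximal key in insertion order (matches max(..., key=get) and the
--     # head of Python's stable descending sort)
--     best, best_n = None, -1
--     for k, n in counts.items():
--         if n > best_n:
--             best, best_n = k, n
--
--     if 2 * best_n > len(tones):
--         return best
--
--     # first maximal key among the remaining ones
--     second, second_n = None, -1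
--     for k, n in counts.items():
--         if k != best and n > second_n:
--             second, second_n = k, n
--
--     return f"{best} with hints of {second}"
-- ===== Notes on version B (the rewrite author's own statement) =====
-- stated objective: alternative
-- what changed: Replaces the stable descending sort of the count keys (sorted(..., reverse=True)[:2]) by two linear first-maximum scans over the counts in insertion order (best, then best among the rest), which reproduces the stable sort's tie-breaking exactly.
import Mathlib
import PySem

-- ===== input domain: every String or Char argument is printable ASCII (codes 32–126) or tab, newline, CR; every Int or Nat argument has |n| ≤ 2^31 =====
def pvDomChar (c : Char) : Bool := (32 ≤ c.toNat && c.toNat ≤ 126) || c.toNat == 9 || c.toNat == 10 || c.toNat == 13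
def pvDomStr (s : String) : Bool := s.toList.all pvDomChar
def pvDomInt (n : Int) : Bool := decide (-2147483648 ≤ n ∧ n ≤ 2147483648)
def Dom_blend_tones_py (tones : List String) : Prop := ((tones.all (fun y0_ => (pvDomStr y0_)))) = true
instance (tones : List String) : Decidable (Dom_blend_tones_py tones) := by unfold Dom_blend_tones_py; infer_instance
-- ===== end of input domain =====

-- B replaces A's stable descending sort of the count keys by two linear first-maximum
-- scans over the counts in insertion order (alternative decomposition, same output).

-- ===== PORT A =====
-- literal port of _blend_tones; `max_count > len(tones) / 2` (int vs float) is ported as the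
-- exact integer equivalent `2 * max_count > len(tones)`; `max(...)` on the provably nonempty
-- values/keys is PySem.List.max? with a default that is never reached.
def blend_tones_py (tones : List String) : String :=
  if tones = [] then "neutral"
  else
    let tone_counts := tones.foldl (fun d tone => d.modify tone 0 (· + 1))
      (PySem.Dict.empty (κ := String) (ν := Int))
    let max_count := (PySem.List.max? tone_counts.values (fun v => v)).getD 0
    if 2 * max_count > PySem.List.len tones then
      (PySem.List.max? tone_counts.keys (fun k => tone_counts.getD k 0)).getD ""
    else
      let top_tones := PySem.List.slice
        (PySem.List.sorted tone_counts.keys (fun k => tone_counts.getD k 0) true) none (some 2)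
      PySem.List.pyGetD top_tones 0 "" ++ " with hints of " ++ PySem.List.pyGetD top_tones 1 ""

-- ===== PORT B =====
-- literal port of Source B: count with a dict, then best/second by linear scans over items
def blend_tones_py_alt (tones : List String) : String :=
  if tones = [] then "neutral"
  else
    let counts := tones.foldl (fun d tone => d.insert tone (d.getD tone 0 + 1))
      (PySem.Dict.empty (κ := String) (ν := Int))
    let best := counts.items.foldl
      (fun (b : Option String × Int) p => if b.2 < p.2 then (some p.1, p.2) else b) (none, -1)
    if 2 * best.2 > PySem.List.len tones then best.1.getD ""
    else
      let second := counts.items.foldl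
        (fun (b : Option String × Int) p =>
          if some p.1 ≠ best.1 ∧ b.2 < p.2 then (some p.1, p.2) else b) (none, -1)
      best.1.getD "" ++ " with hints of " ++ second.1.getD ""

-- ===== PRECONDITION & SPEC =====
def Spec_blend_tones_py (tones : List String) (out : String) : Prop := out = blend_tones_py_alt tones
instance (tones : List String) (out : String) : Decidable (Spec_blend_tones_py tones out) := by unfold Spec_blend_tones_py; infer_instance

-- ===== CLAIM (what is proved, stated in full; the proofs are below) =====
def Claim_equal_blend_tones_py : Prop := ∀ (tones : List String), Dom_blend_tones_py tones → Spec_blend_tones_py tones (blend_tones_py tones)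

-- ===== LEMMAS AND PROOFS =====

-- the step of Python's first-maximum fold (max? with key)
def pvMaxStep {α : Type} (f : α → Int) (acc : Option α) (x : α) : Option α :=
  match acc with
  | none => some x
  | some m => if f m < f x then some x else some m

lemma pvMax_eq_max? {α : Type} (xs : List α) (f : α → Int) :
    xs.foldl (pvMaxStep f) none = PySem.List.max? xs f := by
  unfold PySem.List.max? pvMaxStep
  congr 1

lemma pvInsertBy_cons {α : Type} (before : α → α → Bool) (x y : α) (ys : List α) :
    PySem.List.insertBy before x (y :: ys) =
      if before x y then x :: y :: ys else y :: PySem.List.insertBy before x ys := by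
  simp [PySem.List.insertBy]

lemma pvSortedRev_append (l : List String) (x : String) (f : String → Int) :
    PySem.List.sorted (l ++ [x]) f true =
      PySem.List.insertBy (fun a b => decide (f b < f a)) x (PySem.List.sorted l f true) := by
  rw [PySem.List.sorted_rev_eq_foldl_insertBy, PySem.List.sorted_rev_eq_foldl_insertBy,
    List.foldl_append]
  rfl

-- selection characterisation of Python's stable descending sort:
-- head = first maximal element, tail = stable descending sort of the rest
lemma pvSortedRev_selection (f : String → Int) (xs : List String) :
    PySem.List.sorted xs f true =
      match xs.foldl (pvMaxStep f) none with
      | none => []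
      | some m => m :: PySem.List.sorted (xs.erase m) f true := by
  induction xs using List.reverseRecOn with
  | nil => rfl
  | append_singleton l x ih =>
    rw [pvSortedRev_append, List.foldl_append]
    simp only [List.foldl_cons, List.foldl_nil]
    cases hm : l.foldl (pvMaxStep f) none with
    | none =>
      have hl : l = [] := by
        rw [pvMax_eq_max?] at hm
        exact (PySem.List.max?_eq_none_iff l f).mp hm
      subst hl
      simp [pvMaxStep, PySem.List.insertBy, PySem.List.sorted]
    | some m =>
      rw [hm] at ih
      have hm' : PySem.List.max? l f = some m := by rw [← pvMax_eq_max?]; exact hm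
      have hmem : m ∈ l := PySem.List.max?_mem hm'
      have hmax : ∀ y ∈ l, f y ≤ f m := PySem.List.max?_isMax hm'
      by_cases hlt : f m < f x
      · have hxnot : x ∉ l := fun hx => absurd (hmax x hx) (by omega)
        rw [ih, pvInsertBy_cons, if_pos (by simpa using hlt)]
        simp only [pvMaxStep, if_pos hlt]
        rw [List.erase_append_right _ hxnot]
        simp [← ih]
      · rw [ih, pvInsertBy_cons, if_neg (by simpa using hlt)]
        simp only [pvMaxStep, if_neg hlt]
        rw [List.erase_append_left _ hmem, pvSortedRev_append]

-- B's running best/second state, as a view of the optional current maximum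
def pvG {α : Type} (acc : Option (α × Int)) : Option α × Int :=
  match acc with
  | none => (none, -1)
  | some m => (some m.1, m.2)

lemma pvScan_eq {α : Type} (l : List (α × Int)) (h : ∀ p ∈ l, 0 ≤ p.2) :
    ∀ acc : Option (α × Int),
      l.foldl (fun b p => if b.2 < p.2 then (some p.1, p.2) else b) (pvG acc) =
        pvG (l.foldl (pvMaxStep (fun p => p.2)) acc) := by
  induction l with
  | nil => intro acc; rfl
  | cons p l ih =>
    intro acc
    have h0 : 0 ≤ p.2 := h p (by simp)
    simp only [List.foldl_cons]
    have hstep : (if (pvG acc).2 < p.2 then (some p.1, p.2) else pvG acc) =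
        pvG (pvMaxStep (fun q => q.2) acc p) := by
      cases acc with
      | none => simp only [pvG, pvMaxStep]; rw [if_pos (by omega)]
      | some m => by_cases hc : m.2 < p.2 <;> simp [pvG, pvMaxStep, hc]
    rw [hstep]
    exact ih (fun q hq => h q (by simp [hq])) _

lemma pvMax_map {α β : Type} (g : α → β) (f : β → Int) (xs : List α) :
    ∀ acc : Option α,
      (xs.map g).foldl (pvMaxStep f) (acc.map g) =
        (xs.foldl (pvMaxStep (fun a => f (g a))) acc).map g := by
  induction xs with
  | nil => intro acc; rfl
  | cons x xs ih =>
    intro acc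
    simp only [List.map_cons, List.foldl_cons]
    have hstep : pvMaxStep f (acc.map g) (g x) = (pvMaxStep (fun a => f (g a)) acc x).map g := by
      cases acc with
      | none => rfl
      | some m => simp only [pvMaxStep, Option.map_some]; split_ifs <;> rfl
    rw [hstep]
    exact ih _

lemma pvGuard_filter (m : Option String) (l : List (String × Int)) :
    ∀ init : Option String × Int,
      l.foldl (fun b p => if some p.1 ≠ m ∧ b.2 < p.2 then (some p.1, p.2) else b) init =
        (l.filter (fun p => decide (some p.1 ≠ m))).foldl
          (fun b p => if b.2 < p.2 then (some p.1, p.2) else b) init := by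
  induction l with
  | nil => intro init; rfl
  | cons p l ih =>
    intro init
    rw [List.foldl_cons, List.filter_cons]
    by_cases hc : some p.1 = m
    · rw [show (if some p.1 ≠ m ∧ init.2 < p.2 then (some p.1, p.2) else init) = init from by
          simp [hc],
        if_neg (show ¬(decide (some p.1 ≠ m) = true) from by simp [hc])]
      exact ih init
    · rw [show (if some p.1 ≠ m ∧ init.2 < p.2 then (some p.1, p.2) else init) =
          (if init.2 < p.2 then (some p.1, p.2) else init) from by
            by_cases h2 : init.2 < p.2 <;> simp [hc, h2],
        if_pos (show decide (some p.1 ≠ m) = true from by simp [hc]), List.foldl_cons]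
      exact ih _

-- the common value both ports compute on a nonempty input
def pvRes (tones : List String) : String :=
  let d := PySem.Dict.counter tones
  let f : String → Int := fun k => d.getD k 0
  match PySem.List.max? d.keys f with
  | none => "neutral"
  | some m1 =>
    if 2 * f m1 > (tones.length : Int) then m1
    else
      match PySem.List.max? (d.keys.erase m1) f with
      | none => ""
      | some m2 => m1 ++ " with hints of " ++ m2

lemma pv_keys_ne (tones : List String) (h : tones ≠ []) :
    (PySem.Dict.counter tones).keys ≠ [] := by
  obtain ⟨t, ts, rfl⟩ := List.exists_cons_of_ne_nil h
  rw [PySem.Dict.keys_counter]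
  have ht : t ∈ PySem.Set.ofList (t :: ts) := (PySem.Set.mem_ofList _ _).mpr (by simp)
  exact List.ne_nil_of_mem ht

lemma pv_nonneg (tones : List String) :
    ∀ p ∈ (PySem.Dict.counter tones).keys.map
        (fun k => (k, (PySem.Dict.counter tones).getD k 0)), 0 ≤ p.2 := by
  intro p hp
  obtain ⟨k, _, rfl⟩ := List.mem_map.mp hp
  simp only [PySem.Dict.getD_counter]
  exact Int.natCast_nonneg _

-- if the first maximum is the only key, every tone equals it and the majority test holds
lemma pv_erase_ne (tones : List String) (m1 : String) (h : tones ≠ [])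
    (hm1 : PySem.List.max? (PySem.Dict.counter tones).keys
      (fun k => (PySem.Dict.counter tones).getD k 0) = some m1)
    (hmaj : ¬ 2 * (PySem.Dict.counter tones).getD m1 0 > (tones.length : Int)) :
    (PySem.Dict.counter tones).keys.erase m1 ≠ [] := by
  intro h0
  have hmem : m1 ∈ (PySem.Dict.counter tones).keys := PySem.List.max?_mem hm1
  have hk1 : (PySem.Dict.counter tones).keys = [m1] := by
    have h1 := List.length_erase_of_mem hmem
    rw [h0] at h1
    simp only [List.length_nil] at h1
    have h2 := List.length_pos_of_mem hmem
    have hlen1 : (PySem.Dict.counter tones).keys.length = 1 := by omega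
    obtain ⟨a, ha⟩ := List.length_eq_one_iff.mp hlen1
    rw [ha] at hmem ⊢
    simp only [List.mem_singleton] at hmem
    rw [hmem]
  have hall : ∀ t ∈ tones, m1 = t := by
    intro t ht
    have htk : t ∈ (PySem.Dict.counter tones).keys := by
      rw [PySem.Dict.keys_counter]
      exact (PySem.Set.mem_ofList _ _).mpr ht
    rw [hk1] at htk
    exact (List.mem_singleton.mp htk).symm
  have hcnt : tones.count m1 = tones.length := List.count_eq_length.mpr hall
  apply hmaj
  rw [PySem.Dict.getD_counter, hcnt]
  have hlen0 : tones.length ≠ 0 := fun h' => h (List.length_eq_zero_iff.mp h')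
  omega

lemma portA_eq (tones : List String) (h : tones ≠ []) : blend_tones_py tones = pvRes tones := by
  simp only [blend_tones_py, pvRes, if_neg h]
  rw [← PySem.Dict.counter_eq_foldl]
  have hnd := PySem.Dict.nodup_keys_counter tones
  cases hm1 : PySem.List.max? (PySem.Dict.counter tones).keys
      (fun k => (PySem.Dict.counter tones).getD k 0) with
  | none => exact absurd ((PySem.List.max?_eq_none_iff _ _).mp hm1) (pv_keys_ne tones h)
  | some m1 =>
    have hmaxval : PySem.List.max? (PySem.Dict.counter tones).values (fun v => v) =
        some ((PySem.Dict.counter tones).getD m1 0) := by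
      rw [PySem.Dict.values_eq_map_keys _ hnd 0, ← pvMax_eq_max?]
      rw [show (none : Option Int) = Option.map (fun k => (PySem.Dict.counter tones).getD k 0)
        (none : Option String) from rfl, pvMax_map]
      rw [show (fun a => (PySem.Dict.counter tones).getD a 0) =
        (fun k => (PySem.Dict.counter tones).getD k 0) from rfl, pvMax_eq_max?, hm1]
      rfl
    rw [hmaxval]
    simp only [Option.getD_some, PySem.List.len_eq]
    by_cases hmaj : 2 * (PySem.Dict.counter tones).getD m1 0 > (tones.length : Int)
    · rw [if_pos hmaj, if_pos hmaj]
    · rw [if_neg hmaj, if_neg hmaj]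
      cases hm2 : PySem.List.max? ((PySem.Dict.counter tones).keys.erase m1)
          (fun k => (PySem.Dict.counter tones).getD k 0) with
      | none =>
        exact absurd ((PySem.List.max?_eq_none_iff _ _).mp hm2)
          (pv_erase_ne tones m1 h hm1 hmaj)
      | some m2 =>
        rw [pvSortedRev_selection, pvMax_eq_max?, hm1]
        simp only
        rw [pvSortedRev_selection, pvMax_eq_max?, hm2]
        simp only
        rw [PySem.List.slice_to _ (by norm_num)]
        simp [PySem.List.pyGetD_zero_cons]
        rw [show (1 : Int) = ((1 : Nat) : Int) from rfl, PySem.List.pyGetD_natCast]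
        rfl

lemma portB_eq (tones : List String) (h : tones ≠ []) :
    blend_tones_py_alt tones = pvRes tones := by
  simp only [blend_tones_py_alt, pvRes, if_neg h]
  rw [PySem.Dict.foldl_insert_getD_add_one_eq_counter]
  have hnd := PySem.Dict.nodup_keys_counter tones
  have hitems := PySem.Dict.items_eq_map_keys (PySem.Dict.counter tones) hnd 0
  cases hm1 : PySem.List.max? (PySem.Dict.counter tones).keys
      (fun k => (PySem.Dict.counter tones).getD k 0) with
  | none => exact absurd ((PySem.List.max?_eq_none_iff _ _).mp hm1) (pv_keys_ne tones h)
  | some m1 =>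
    have hbest : (PySem.Dict.counter tones).items.foldl
        (fun (b : Option String × Int) p => if b.2 < p.2 then (some p.1, p.2) else b)
        (none, -1) = (some m1, (PySem.Dict.counter tones).getD m1 0) := by
      rw [hitems, show ((none, -1) : Option String × Int) = pvG (none : Option (String × Int))
        from rfl, pvScan_eq _ (pv_nonneg tones)]
      rw [show (none : Option (String × Int)) = Option.map
        (fun k => (k, (PySem.Dict.counter tones).getD k 0)) (none : Option String) from rfl,
        pvMax_map]
      rw [show (fun a => ((a, (PySem.Dict.counter tones).getD a 0) : String × Int).2) =
        (fun k => (PySem.Dict.counter tones).getD k 0) from rfl, pvMax_eq_max?, hm1]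
      rfl
    rw [hbest]
    simp only [PySem.List.len_eq]
    by_cases hmaj : 2 * (PySem.Dict.counter tones).getD m1 0 > (tones.length : Int)
    · rw [if_pos hmaj, if_pos hmaj]
      rfl
    · rw [if_neg hmaj, if_neg hmaj]
      cases hm2 : PySem.List.max? ((PySem.Dict.counter tones).keys.erase m1)
          (fun k => (PySem.Dict.counter tones).getD k 0) with
      | none =>
        exact absurd ((PySem.List.max?_eq_none_iff _ _).mp hm2)
          (pv_erase_ne tones m1 h hm1 hmaj)
      | some m2 =>
        have hfilter : (PySem.Dict.counter tones).items.filter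
            (fun p => decide (some p.1 ≠ some m1)) =
            ((PySem.Dict.counter tones).keys.erase m1).map
              (fun k => (k, (PySem.Dict.counter tones).getD k 0)) := by
          rw [hitems, List.filter_map]
          congr 1
          rw [List.Nodup.erase_eq_filter hnd]
          apply List.filter_congr
          intro k _
          by_cases hk : k = m1 <;> simp [hk]
        have hsecond : (PySem.Dict.counter tones).items.foldl
            (fun (b : Option String × Int) p =>
              if some p.1 ≠ some m1 ∧ b.2 < p.2 then (some p.1, p.2) else b)
            (none, -1) = (some m2, (PySem.Dict.counter tones).getD m2 0) := by
          rw [pvGuard_filter, hfilter,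
            show ((none, -1) : Option String × Int) = pvG (none : Option (String × Int)) from rfl,
            pvScan_eq _ (fun p hp => by
              obtain ⟨k, _, rfl⟩ := List.mem_map.mp hp
              simp only [PySem.Dict.getD_counter]
              exact Int.natCast_nonneg _)]
          rw [show (none : Option (String × Int)) = Option.map
            (fun k => (k, (PySem.Dict.counter tones).getD k 0)) (none : Option String) from rfl,
            pvMax_map]
          rw [show (fun a => ((a, (PySem.Dict.counter tones).getD a 0) : String × Int).2) =
            (fun k => (PySem.Dict.counter tones).getD k 0) from rfl, pvMax_eq_max?, hm2]
          rfl
        rw [hsecond]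
        rfl

-- ===== VERDICT (by name: the statement is the Claim_ definition above) =====
theorem blend_tones_py_spec : Claim_equal_blend_tones_py := by
  intro tones _
  unfold Spec_blend_tones_py
  by_cases h : tones = []
  · rw [h]; rfl
  · rw [portA_eq tones h, portB_eq tones h]
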